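-- pv_equiv track=rewrite | github.com/matthannan1/Coursera | a2.py | get_complementary_sequence
-- ===== SOURCE A (Python) =====
-- def is_valid_sequence(dna):
--     """ (str) -> bool
--
--     Return True if and only if the DNA sequence is valid (that is, it
--     contains no characters other than 'A', 'T', 'C' and 'G').
--
--     >>> is_valid_sequence('ATCGGC')
--     True
--     >>> is_valid_sequence('ASTCG')
--     False
--     >>> is_valid_sequence('atcggc')
--     False
--
--     """
--     valid = True
--     nucleotides = "ATCG"
--     for char in dna:
--         if char in nucleotides:
--             valid = True
--         else:
--             valid = False
--             return valid
--     return valid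
--
-- def get_complement(nucleotide):
--     """
--     (str) -> str
--
--     The first parameter is a nucleotide ('A', 'T', 'C' or 'G').
--     Return the nucleotide's complement.
--
--     >>> get_complement('A')
--     'T'
--     >>> get_complement('T')
--     'A'
--     >>> get_complement('G')
--     'C'
--     >>> get_complement('C')
--     'G'
--     >>> get_complement('W')
--     'Not Valid'
--
--     """
--     if nucleotide == 'A':
--         return 'T'
--     elif nucleotide == 'T':
--         return 'A'
--     elif nucleotide == 'G':
--         return 'C'
--     elif nucleotide == 'C':
--         return 'G'
--     else:
--         return 'Not Valid'
--
-- def get_complementary_sequence(dna1):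
--     """
--     (str) -> str
--
--     The parameter is a DNA sequence. Return the DNA sequence
--     that is complementary to the given DNA sequence.
--
--     >>> get_complementary_sequence('ATGC')
--     'TACG'
--     >>> get_complementary_sequence('ATXYZ')
--     'Invalid Sequence'
--     """
--
--     if is_valid_sequence(dna1):
--         dna2 = ''
--         for char in dna1:
--             dna2 = dna2 + get_complement(char)
--         return dna2
--     else:
--         return 'Invalid Sequence'
-- ===== SOURCE B (Python) =====
-- def get_complementary_sequence(dna1):
--     complement = {'A': 'T', 'T': 'A', 'G': 'C', 'C': 'G'}
--     out = []
--     for char in dna1: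
--         mapped = complement.get(char)
--         if mapped is None:
--             return 'Invalid Sequence'
--         out.append(mapped)
--     return ''.join(out)
-- ===== Notes on version B (the rewrite author's own statement) =====
-- stated objective: simpler
-- what changed: Replaces A's two passes (a separate whole-string validation loop, then a rebuild loop calling an if-chain complement helper) with one combined scan over a complement table that bails out at the first bad character and joins the collected complements.
import Mathlib
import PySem

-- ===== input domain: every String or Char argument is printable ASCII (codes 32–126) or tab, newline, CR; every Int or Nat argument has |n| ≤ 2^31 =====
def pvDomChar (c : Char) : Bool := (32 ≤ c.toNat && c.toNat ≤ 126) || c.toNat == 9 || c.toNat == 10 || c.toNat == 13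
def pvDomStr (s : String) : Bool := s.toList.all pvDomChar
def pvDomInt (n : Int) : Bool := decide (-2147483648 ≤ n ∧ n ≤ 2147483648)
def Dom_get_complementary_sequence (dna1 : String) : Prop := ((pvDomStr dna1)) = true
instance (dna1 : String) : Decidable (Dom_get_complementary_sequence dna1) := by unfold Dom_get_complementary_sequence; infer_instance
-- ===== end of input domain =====

-- B folds A's separate validate-then-rebuild passes into a single table-lookup scan with early exit; objective: simpler.


-- ===== PORT A =====
-- Python's `char in "ATCG"` for a single char = membership in the char list (exact here).
def is_valid_sequence_go : List Char → Bool
  | [] => true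
  | c :: rest => if ("ATCG".toList.contains c) then is_valid_sequence_go rest else false

def is_valid_sequence (dna : String) : Bool := is_valid_sequence_go dna.toList

def get_complement (nucleotide : Char) : String :=
  if nucleotide = 'A' then "T"
  else if nucleotide = 'T' then "A"
  else if nucleotide = 'G' then "C"
  else if nucleotide = 'C' then "G"
  else "Not Valid"

def get_complementary_sequence (dna1 : String) : String :=
  if is_valid_sequence dna1 then
    dna1.toList.foldl (fun dna2 c => dna2 ++ get_complement c) ""
  else
    "Invalid Sequence"

-- ===== PORT B =====
-- complement.get(char): the literal dict lookup
def pvComplementGet (c : Char) : Option Char :=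
  PySem.Dict.get? (PySem.Dict.ofList [('A','T'), ('T','A'), ('G','C'), ('C','G')]) c

-- the single pass: append the mapped complement, or return 'Invalid Sequence' at the first miss
def get_complementary_sequence_alt_go : List Char → Option (List Char)
  | [] => some []
  | c :: rest =>
    match pvComplementGet c with
    | none => none
    | some d => (get_complementary_sequence_alt_go rest).map (d :: ·)

def get_complementary_sequence_alt (dna1 : String) : String :=
  match get_complementary_sequence_alt_go dna1.toList with
  | none => "Invalid Sequence"
  | some out => String.ofList out

-- ===== PRECONDITION & SPEC =====
def Spec_get_complementary_sequence (dna1 : String) (out : String) : Prop := out = get_complementary_sequence_alt dna1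
instance (dna1 : String) (out : String) : Decidable (Spec_get_complementary_sequence dna1 out) := by unfold Spec_get_complementary_sequence; infer_instance

-- ===== CLAIM (what is proved, stated in full; the proofs are below) =====
def Claim_equal_get_complementary_sequence : Prop := ∀ (dna1 : String), Dom_get_complementary_sequence dna1 → Spec_get_complementary_sequence dna1 (get_complementary_sequence dna1)

-- ===== LEMMAS AND PROOFS =====

lemma atcg_toList : "ATCG".toList = ['A', 'T', 'C', 'G'] := by decide

lemma valid_char_cases (c : Char) (h : ("ATCG".toList.contains c) = true) :
    c = 'A' ∨ c = 'T' ∨ c = 'C' ∨ c = 'G' := by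
  rw [atcg_toList] at h
  simp only [List.contains_cons, List.contains_nil, Bool.or_eq_true, beq_iff_eq] at h
  tauto

lemma complement_dict_mk :
    PySem.Dict.ofList [('A','T'), ('T','A'), ('G','C'), ('C','G')] =
      PySem.Dict.mk [('A','T'), ('T','A'), ('G','C'), ('C','G')] := by decide

lemma complementGet_none {c : Char} (h : ("ATCG".toList.contains c) = false) :
    pvComplementGet c = none := by
  rw [atcg_toList] at h
  simp only [List.contains_cons, List.contains_nil, Bool.or_eq_false_iff,
    beq_eq_false_iff_ne, ne_eq] at h
  have h1 : c ≠ 'A' := by tauto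
  have h2 : c ≠ 'T' := by tauto
  have h3 : c ≠ 'G' := by tauto
  have h4 : c ≠ 'C' := by tauto
  rw [pvComplementGet, complement_dict_mk]
  simp [PySem.Dict.get?, Ne.symm h1, Ne.symm h2, Ne.symm h3, Ne.symm h4]

-- one valid cons step, shared by the four nucleotide cases
lemma cons_step {c d : Char} {rest m : List Char}
    (hget : pvComplementGet c = some d)
    (hcomp : get_complement c = String.ofList [d])
    (hm : get_complementary_sequence_alt_go rest = some m)
    (hfold : ∀ acc : String,
      rest.foldl (fun dna2 c => dna2 ++ get_complement c) acc = acc ++ String.ofList m) :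
    get_complementary_sequence_alt_go (c :: rest) = some (d :: m) ∧
      ∀ acc : String, (c :: rest).foldl (fun dna2 c => dna2 ++ get_complement c) acc
        = acc ++ String.ofList (d :: m) := by
  constructor
  · simp [get_complementary_sequence_alt_go, hget, hm]
  · intro acc
    simp only [List.foldl_cons, hfold, hcomp]
    rw [show String.ofList (d :: m) = String.ofList [d] ++ String.ofList m from
      String.ofList_append (l₁ := [d]), ← String.append_assoc]

-- on a valid list, B's scan succeeds and A's fold (with any accumulator) builds acc ++ the scan's result
lemma main_valid : ∀ (l : List Char), is_valid_sequence_go l = true →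
    ∃ m, get_complementary_sequence_alt_go l = some m ∧
      ∀ acc : String, l.foldl (fun dna2 c => dna2 ++ get_complement c) acc = acc ++ String.ofList m := by
  intro l
  induction l with
  | nil =>
    intro _
    exact ⟨[], rfl, fun acc => by simp⟩
  | cons c rest ih =>
    intro h
    simp only [is_valid_sequence_go] at h
    by_cases hc : ("ATCG".toList.contains c) = true
    · rw [if_pos hc] at h
      obtain ⟨m, hm, hfold⟩ := ih h
      rcases valid_char_cases c hc with rfl | rfl | rfl | rfl
      · exact ⟨'T' :: m, cons_step (by decide) (by decide) hm hfold⟩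
      · exact ⟨'A' :: m, cons_step (by decide) (by decide) hm hfold⟩
      · exact ⟨'G' :: m, cons_step (by decide) (by decide) hm hfold⟩
      · exact ⟨'C' :: m, cons_step (by decide) (by decide) hm hfold⟩
    · rw [if_neg hc] at h
      exact absurd h (by simp)

-- if A's validation fails, B's scan also fails
lemma main_invalid : ∀ (l : List Char), is_valid_sequence_go l = false →
    get_complementary_sequence_alt_go l = none := by
  intro l
  induction l with
  | nil => intro h; simp [is_valid_sequence_go] at h
  | cons c rest ih =>
    intro h
    simp only [is_valid_sequence_go] at h
    by_cases hc : ("ATCG".toList.contains c) = true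
    · rw [if_pos hc] at h
      simp only [get_complementary_sequence_alt_go, ih h]
      cases pvComplementGet c <;> rfl
    · simp [get_complementary_sequence_alt_go,
        complementGet_none (Bool.eq_false_iff.mpr hc)]

-- ===== VERDICT (by name: the statement is the Claim_ definition above) =====
theorem get_complementary_sequence_spec : Claim_equal_get_complementary_sequence := by
  intro dna1 _
  unfold Spec_get_complementary_sequence get_complementary_sequence get_complementary_sequence_alt
  by_cases hv : is_valid_sequence dna1 = true
  · rw [if_pos hv]
    obtain ⟨m, hm, hfold⟩ := main_valid dna1.toList hv
    rw [hm, hfold ""]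
    simp
  · rw [if_neg hv]
    rw [main_invalid dna1.toList (Bool.eq_false_iff.mpr hv)]
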